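-- pv_equiv track=rewrite | github.com/OleguerCanal/transformer_ingredients | transplanter/transformer_encoder_transplanter.py | _group_params
-- ===== SOURCE A (Python) =====
-- def _group_params(params):
--     def _get_group_id(name):
--         if name.split(".")[2].isnumeric():
--             return name.split(".")[2]
--         return name.split(".")[1]
--
--     grouped_param_names, current_group = [], []
--     current_id = None
--     for param_name in params:
--         if len(param_name.split(".")) <= 2:
--             continue
--         block_id = _get_group_id(param_name)
--         if block_id == current_id:
--             current_group.append(param_name)
--         else:
--             if len(current_group) > 0:
--                 grouped_param_names.append(current_group)
--             current_group = [param_name]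
--         current_id = block_id
--     grouped_param_names.append(current_group)
--     return grouped_param_names
-- ===== SOURCE B (Python) =====
-- def _group_params(params):
--     def _get_group_id(name):
--         parts = name.split(".")
--         return parts[2] if parts[2].isnumeric() else parts[1]
--
--     filtered = [p for p in params if len(p.split(".")) > 2]
--     keys = [_get_group_id(p) for p in filtered]
--     cuts = [0] + [i for i in range(1, len(filtered)) if keys[i] != keys[i - 1]] + [len(filtered)]
--     return [filtered[a:b] for a, b in zip(cuts, cuts[1:])]
-- ===== Notes on version B (the rewrite author's own statement) =====
-- stated objective: alternative
-- what changed: A's one-pass state machine (current_id/current_group with a trailing append) is replaced by a two-phase algorithm: filter the names, compute the boundary indices where the group key changes, and slice the filtered list between consecutive boundaries.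
import Mathlib
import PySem

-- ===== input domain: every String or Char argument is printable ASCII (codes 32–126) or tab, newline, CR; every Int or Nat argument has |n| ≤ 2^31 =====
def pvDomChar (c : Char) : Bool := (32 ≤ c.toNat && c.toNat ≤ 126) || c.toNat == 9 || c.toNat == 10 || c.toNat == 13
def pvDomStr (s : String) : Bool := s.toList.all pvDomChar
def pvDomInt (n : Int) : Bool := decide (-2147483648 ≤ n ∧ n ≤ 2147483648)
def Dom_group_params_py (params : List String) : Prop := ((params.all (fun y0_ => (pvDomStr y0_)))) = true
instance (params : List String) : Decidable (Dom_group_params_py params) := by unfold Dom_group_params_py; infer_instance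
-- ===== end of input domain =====

-- B replaces A's streaming state machine (current_id/current_group with a trailing append) by a
-- two-phase algorithm: compute the boundary indices where the group key changes, then slice the
-- filtered list between consecutive boundaries (objective: alternative, same asymptotic cost).


-- ===== PORT A =====
-- name.split(".") ; split? returns some because the separator "." is nonempty.
def pvSplitDotsA (name : String) : List String := (PySem.Str.split? name ".").getD []

-- _get_group_id: every call site has len(name.split(".")) > 2, so the [2]/[1] accesses are in
-- range and getD is exact there; str.isnumeric coincides with strIsdigit on the ASCII domain.
def pvGidA (name : String) : String :=
  if PySem.Str.strIsdigit ((pvSplitDotsA name).getD 2 "") then (pvSplitDotsA name).getD 2 ""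
  else (pvSplitDotsA name).getD 1 ""

-- the for-loop, state (grouped_param_names, current_group, current_id)
def pvLoopA : List String → List (List String) → List String → Option String →
    List (List String) × List String × Option String
  | [], acc, cur, cid => (acc, cur, cid)
  | p :: rest, acc, cur, cid =>
    if (pvSplitDotsA p).length ≤ 2 then pvLoopA rest acc cur cid
    else
      let b := pvGidA p
      if some b == cid then pvLoopA rest acc (cur ++ [p]) (some b)
      else pvLoopA rest (if cur.length > 0 then acc ++ [cur] else acc) [p] (some b)

def group_params_py (params : List String) : List (List String) :=
  let st := pvLoopA params [] [] none
  st.1 ++ [st.2.1]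

-- ===== PORT B =====
def pvSplitDotsB (name : String) : List String := (PySem.Str.split? name ".").getD []

-- same in-range remark as for pvGidA: only applied to names with > 2 dot-separated parts.
def pvGidB (name : String) : String :=
  let parts := pvSplitDotsB name
  if PySem.Str.strIsdigit (parts.getD 2 "") then parts.getD 2 "" else parts.getD 1 ""

-- keys[i] for 1 ≤ i < len(filtered) is in range, so getD is exact; range(1, n) = List.range' 1 (n-1);
-- cuts[1:] = cuts.tail; filtered[a:b] = PySem.List.slice.
def group_params_py_alt (params : List String) : List (List String) :=
  let filtered := params.filter (fun p => decide (2 < (pvSplitDotsB p).length))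
  let keys := filtered.map pvGidB
  let cuts := (0 :: (List.range' 1 (filtered.length - 1)).filter
      (fun i => !(keys.getD i "" == keys.getD (i - 1) ""))) ++ [filtered.length]
  (cuts.zip cuts.tail).map (fun ab => PySem.List.slice filtered (some (ab.1 : Int)) (some (ab.2 : Int)))

-- ===== PRECONDITION & SPEC =====
def Spec_group_params_py (params : List String) (out : List (List String)) : Prop := out = group_params_py_alt params
instance (params : List String) (out : List (List String)) : Decidable (Spec_group_params_py params out) := by unfold Spec_group_params_py; infer_instance

-- ===== CLAIM (what is proved, stated in full; the proofs are below) =====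
def Claim_equal_group_params_py : Prop := ∀ (params : List String), Dom_group_params_py params → Spec_group_params_py params (group_params_py params)

-- ===== LEMMAS AND PROOFS =====

theorem pvGid_eq : pvGidA = pvGidB := rfl

theorem pvSplitDots_eq : pvSplitDotsA = pvSplitDotsB := rfl

-- reference function: grouping of consecutive equal-key runs, one (possibly empty) seed group
def pvChop : List String → List (List String)
  | [] => [[]]
  | [x] => [[x]]
  | x :: y :: t =>
    let r := pvChop (y :: t)
    if pvGidB x == pvGidB y then
      match r with
      | [] => [[x]]
      | g :: gs => (x :: g) :: gs
    else [x] :: r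

theorem pvChop_ne_nil (l : List String) : pvChop l ≠ [] := by
  match l with
  | [] => simp [pvChop]
  | [x] => simp [pvChop]
  | x :: y :: t =>
    simp only [pvChop]
    split <;> [skip; simp]
    split <;> simp

-- == A-side: the loop computes pvChop of the filtered list ==

def pvAtt (cur : List String) (k : String) (l : List String) : List (List String) :=
  match l with
  | [] => [cur]
  | p :: _ =>
    if pvGidB p == k then (cur ++ (pvChop l).headD []) :: (pvChop l).tail
    else cur :: pvChop l

theorem pvAtt_cons (p : String) (rest : List String) (cur : List String) :
    pvAtt (cur ++ [p]) (pvGidB p) rest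
      = (cur ++ (pvChop (p :: rest)).headD []) :: (pvChop (p :: rest)).tail := by
  match rest with
  | [] => simp [pvAtt, pvChop]
  | q :: t =>
    obtain ⟨g, gs, hgg⟩ : ∃ g gs, pvChop (q :: t) = g :: gs := by
      rcases h : pvChop (q :: t) with _ | ⟨g, gs⟩
      · exact absurd h (pvChop_ne_nil _)
      · exact ⟨g, gs, rfl⟩
    by_cases h : pvGidB p = pvGidB q
    · simp [pvAtt, pvChop, hgg, h]
    · simp [pvAtt, pvChop, hgg, h, Ne.symm h]

def pvRunA (l : List String) (acc : List (List String)) (cur : List String) (cid : Option String) :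
    List (List String) :=
  (pvLoopA l acc cur cid).1 ++ [(pvLoopA l acc cur cid).2.1]

theorem pvRunA_eq_att (l : List String) (hl : ∀ p ∈ l, 2 < (pvSplitDotsA p).length) :
    ∀ (acc : List (List String)) (cur : List String) (k : String), cur ≠ [] →
      pvRunA l acc cur (some k) = acc ++ pvAtt cur k l := by
  induction l with
  | nil => intro acc cur k _; simp [pvRunA, pvLoopA, pvAtt]
  | cons p rest ih =>
    intro acc cur k hcur
    have hp : ¬ (pvSplitDotsA p).length ≤ 2 := by
      have := hl p (List.mem_cons_self ..); omega
    have hrest : ∀ q ∈ rest, 2 < (pvSplitDotsA q).length := fun q hq => hl q (List.mem_cons_of_mem _ hq)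
    by_cases hk : pvGidA p = k
    · have : pvRunA (p :: rest) acc cur (some k) = pvRunA rest acc (cur ++ [p]) (some (pvGidA p)) := by
        simp [pvRunA, pvLoopA, hp, hk]
      rw [this, ih hrest acc (cur ++ [p]) (pvGidA p) (by simp)]
      rw [pvGid_eq] at hk ⊢
      rw [pvAtt_cons, pvAtt]
      simp [hk]
    · have : pvRunA (p :: rest) acc cur (some k) = pvRunA rest (acc ++ [cur]) [p] (some (pvGidA p)) := by
      -- cur ≠ [] so len(current_group) > 0
        have hlen : cur.length > 0 := List.length_pos_iff.mpr hcur
        simp [pvRunA, pvLoopA, hp, hk, hlen]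
      rw [this, ih hrest (acc ++ [cur]) [p] (pvGidA p) (by simp)]
      have := pvAtt_cons p rest []
      simp only [List.nil_append] at this
      rw [pvGid_eq] at hk ⊢
      rw [this, pvAtt]
      rcases h : pvChop (p :: rest) with _ | ⟨g, gs⟩
      · exact absurd h (pvChop_ne_nil _)
      · simp [hk]

theorem pvLoopA_filter (l : List String) :
    ∀ acc cur cid, pvLoopA l acc cur cid
      = pvLoopA (l.filter (fun p => decide (2 < (pvSplitDotsA p).length))) acc cur cid := by
  induction l with
  | nil => intros; rfl
  | cons p rest ih =>
    intro acc cur cid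
    by_cases hp : (pvSplitDotsA p).length ≤ 2
    · have : ¬ (2 < (pvSplitDotsA p).length) := by omega
      simp [pvLoopA, hp, this, ih]
    · have h2 : 2 < (pvSplitDotsA p).length := by omega
      simp only [pvLoopA, hp, if_false, List.filter_cons, h2, decide_true, if_true]
      split <;> simp [ih]

theorem groupA_eq_chop (params : List String) :
    group_params_py params
      = pvChop (params.filter (fun p => decide (2 < (pvSplitDotsB p).length))) := by
  have hA : group_params_py params = pvRunA params [] [] none := rfl
  rw [← pvSplitDots_eq]
  set f := params.filter (fun p => decide (2 < (pvSplitDotsA p).length)) with hf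
  have hfl : ∀ p ∈ f, 2 < (pvSplitDotsA p).length := by
    intro p hp
    have := List.of_mem_filter hp
    simpa using this
  have hA2 : group_params_py params = pvRunA f [] [] none := by
    rw [hA]; simp [pvRunA, pvLoopA_filter params, hf]
  rw [hA2]
  rcases hfe : f with _ | ⟨p, rest⟩
  · simp [pvRunA, pvLoopA, pvChop]
  · have hp : ¬ (pvSplitDotsA p).length ≤ 2 := by
      have := hfl p (by rw [hfe]; exact List.mem_cons_self ..); omega
    have hrest : ∀ q ∈ rest, 2 < (pvSplitDotsA q).length := by
      intro q hq; exact hfl q (by rw [hfe]; exact List.mem_cons_of_mem _ hq)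
    have hstep : pvRunA (p :: rest) [] [] none = pvRunA rest [] [p] (some (pvGidA p)) := by
      simp [pvRunA, pvLoopA, hp]
    rw [hstep, pvRunA_eq_att rest hrest [] [p] (pvGidA p) (by simp)]
    have := pvAtt_cons p rest []
    simp only [List.nil_append] at this
    rw [pvGid_eq, this]
    rcases h : pvChop (p :: rest) with _ | ⟨g, gs⟩
    · exact absurd h (pvChop_ne_nil _)
    · simp

-- == B-side: the cut-and-slice computation also equals pvChop ==

def pvMids (l : List String) : List Nat :=
  (List.range' 1 (l.length - 1)).filter
    (fun i => !((l.map pvGidB).getD i "" == (l.map pvGidB).getD (i - 1) ""))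

def pvSlices (l : List String) (cs : List Nat) : List (List String) :=
  (cs.zip cs.tail).map (fun ab => PySem.List.slice l (some (ab.1 : Int)) (some (ab.2 : Int)))

theorem groupB_eq_slices (params : List String) :
    group_params_py_alt params
      = pvSlices (params.filter (fun p => decide (2 < (pvSplitDotsB p).length)))
          ((0 :: pvMids (params.filter (fun p => decide (2 < (pvSplitDotsB p).length))))
            ++ [(params.filter (fun p => decide (2 < (pvSplitDotsB p).length))).length]) := rfl

theorem pvMids_cons (x y : String) (t : List String) :
    pvMids (x :: y :: t)
      = (if pvGidB y == pvGidB x then [] else [1]) ++ (pvMids (y :: t)).map (· + 1) := by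
  unfold pvMids
  have hlen : (x :: y :: t).length - 1 = t.length + 1 := by simp
  rw [hlen, List.range'_succ, List.range'_succ_left, List.filter_cons, List.filter_map]
  have hcond : ∀ i ∈ List.range' 1 t.length,
      ((fun i => !(((x :: y :: t).map pvGidB).getD i "" == ((x :: y :: t).map pvGidB).getD (i - 1) "")) ∘
        (fun i => i + 1)) i
      = (fun i => !(((y :: t).map pvGidB).getD i "" == ((y :: t).map pvGidB).getD (i - 1) "")) i := by
    intro i hi
    have h1 : 1 ≤ i := (List.mem_range'_1.mp hi).1
    obtain ⟨j, rfl⟩ : ∃ j, i = j + 1 := ⟨i - 1, by omega⟩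
    simp
  rw [List.filter_congr hcond]
  by_cases h : pvGidB y = pvGidB x <;> simp [h]

theorem pvSlice_cons_succ (x : String) (l : List String) (a b : Nat) :
    PySem.List.slice (x :: l) (some ((a + 1 : Nat) : Int)) (some ((b + 1 : Nat) : Int))
      = PySem.List.slice l (some (a : Int)) (some (b : Int)) := by
  rw [PySem.List.slice_natCast, PySem.List.slice_natCast]; simp

theorem pvSlices_shift (x : String) (l : List String) (cs : List Nat) :
    pvSlices (x :: l) (cs.map (· + 1)) = pvSlices l cs := by
  unfold pvSlices
  rw [← List.map_tail, List.zip_map, List.map_map]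
  refine List.map_congr_left ?_
  intro ab _
  simpa using pvSlice_cons_succ x l ab.1 ab.2

theorem pvSlices_cons (l : List String) (c d : Nat) (cs : List Nat) :
    pvSlices l (c :: d :: cs) = PySem.List.slice l (some (c : Int)) (some (d : Int)) :: pvSlices l (d :: cs) := rfl

theorem pvSlice_zero_succ (x : String) (l : List String) (b : Nat) :
    PySem.List.slice (x :: l) (some ((0 : Nat) : Int)) (some ((b + 1 : Nat) : Int))
      = x :: PySem.List.slice l (some ((0 : Nat) : Int)) (some ((b : Nat) : Int)) := by
  rw [PySem.List.slice_natCast, PySem.List.slice_natCast]; simp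

theorem slicesB_eq_chop (l : List String) :
    pvSlices l ((0 :: pvMids l) ++ [l.length]) = pvChop l := by
  match l with
  | [] => simp [pvMids, pvSlices, pvChop, PySem.List.slice]
  | [x] => simp [pvMids, pvSlices, pvChop, PySem.List.slice]
  | x :: y :: t =>
    have ih := slicesB_eq_chop (y :: t)
    obtain ⟨e, es, hds⟩ : ∃ e es, pvMids (y :: t) ++ [(y :: t).length] = e :: es := by
      rcases pvMids (y :: t) with _ | ⟨e, es⟩
      · exact ⟨_, _, rfl⟩
      · exact ⟨_, _, rfl⟩
    have hlen2 : (x :: y :: t).length = t.length + 1 + 1 := by simp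
    have hmapds : (pvMids (y :: t)).map (· + 1) ++ [(x :: y :: t).length]
        = (e + 1) :: es.map (· + 1) := by
      rw [hlen2]
      calc (pvMids (y :: t)).map (· + 1) ++ [t.length + 1 + 1]
          = ((pvMids (y :: t)) ++ [(y :: t).length]).map (· + 1) := by simp
        _ = (e + 1) :: es.map (· + 1) := by rw [hds]; rfl
    rw [List.cons_append, hds] at ih
    have hIH : PySem.List.slice (y :: t) (some ((0 : Nat) : Int)) (some ((e : Nat) : Int))
          :: pvSlices (y :: t) (e :: es) = pvChop (y :: t) := by
      rw [← ih, pvSlices_cons]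
    obtain ⟨g, gs, hgg⟩ : ∃ g gs, pvChop (y :: t) = g :: gs := by
      rcases h : pvChop (y :: t) with _ | ⟨g, gs⟩
      · exact absurd h (pvChop_ne_nil _)
      · exact ⟨g, gs, rfl⟩
    rw [hgg] at hIH
    have hcuts : (0 :: pvMids (x :: y :: t)) ++ [(x :: y :: t).length]
        = 0 :: ((if pvGidB y == pvGidB x then [] else [1])
            ++ ((pvMids (y :: t)).map (· + 1) ++ [(x :: y :: t).length])) := by
      rw [pvMids_cons]; simp
    by_cases h : pvGidB x = pvGidB y
    · -- same key: the first cut shifts by one and x joins the first group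
      rw [hcuts]
      simp only [h, beq_self_eq_true, if_true, List.nil_append]
      rw [hmapds, pvSlices_cons]
      have hshift : pvSlices (x :: y :: t) ((e + 1) :: es.map (· + 1))
          = pvSlices (y :: t) (e :: es) := by
        have := pvSlices_shift x (y :: t) (e :: es)
        simpa using this
      rw [hshift, pvSlice_zero_succ x (y :: t) e]
      have h1 := (List.cons.injEq _ _ _ _ ▸ hIH).1
      have h2 := (List.cons.injEq _ _ _ _ ▸ hIH).2
      rw [h1, h2]
      simp [pvChop, h, hgg]
    · -- key changes at x: [x] becomes its own group
      rw [hcuts]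
      have hb : (pvGidB y == pvGidB x) = false := by simp [Ne.symm h]
      simp only [hb, Bool.false_eq_true, if_false, List.singleton_append]
      have hone : (1 :: ((pvMids (y :: t)).map (· + 1) ++ [(x :: y :: t).length]))
          = (0 :: (pvMids (y :: t) ++ [(y :: t).length])).map (· + 1) := by
        rw [hlen2]; simp
      have hsplit : pvSlices (x :: y :: t)
            (0 :: 1 :: ((pvMids (y :: t)).map (· + 1) ++ [(x :: y :: t).length]))
          = PySem.List.slice (x :: y :: t) (some ((0 : Nat) : Int)) (some ((1 : Nat) : Int))
            :: pvSlices (x :: y :: t) (1 :: ((pvMids (y :: t)).map (· + 1) ++ [(x :: y :: t).length])) :=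
        pvSlices_cons _ _ _ _
      rw [hsplit, hone, pvSlices_shift, hds, ih]
      have hx : PySem.List.slice (x :: y :: t) (some ((0 : Nat) : Int)) (some ((1 : Nat) : Int)) = [x] := by
        simp [PySem.List.slice]
      rw [hx]
      simp [pvChop, h]

-- ===== VERDICT (by name: the statement is the Claim_ definition above) =====
theorem group_params_py_spec : Claim_equal_group_params_py := by
  intro params _
  unfold Spec_group_params_py
  rw [groupA_eq_chop, groupB_eq_slices, slicesB_eq_chop]
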